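-- pv_equiv track=rewrite | github.com/kitessafikadu/competitive-programming | 18-Feb-2025/Apply Operations to an Array 272568.py | applyOperations
-- ===== SOURCE A (Python) =====
-- def applyOperations(nums):
--     """
--     :type nums: List[int]
--     :rtype: List[int]
--     """
--     for i in range(len(nums) - 1):
--         if nums[i] == nums[i+1]:
--             nums[i] = nums[i] * 2
--             nums[i + 1] = 0
--
--     non_zero_index = 0
--     for i in range(len(nums)):
--         if nums[i] != 0:
--             nums[non_zero_index], nums[i]  = nums[i], nums[non_zero_index]
--             non_zero_index += 1
--
--     return nums
-- ===== SOURCE B (Python) =====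
-- def applyOperations(nums):
--     """
--     :type nums: List[int]
--     :rtype: List[int]
--     """
--     res = []
--     i = 0
--     n = len(nums)
--     while i < n:
--         if i + 1 < n and nums[i] == nums[i + 1]:
--             v = nums[i] * 2
--             i += 2
--         else:
--             v = nums[i]
--             i += 1
--         if v:
--             res.append(v)
--     nums[:] = res + [0] * (n - len(res))
--     return nums
-- ===== Notes on version B (the rewrite author's own statement) =====
-- stated objective: alternative
-- what changed: Replaces A's two in-place index passes (adjacent merge then swap-based zero shift) by one forward scan that consumes disjoint equal pairs, emits only non-zero results, and pads with zeros at the end.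
import Mathlib
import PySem

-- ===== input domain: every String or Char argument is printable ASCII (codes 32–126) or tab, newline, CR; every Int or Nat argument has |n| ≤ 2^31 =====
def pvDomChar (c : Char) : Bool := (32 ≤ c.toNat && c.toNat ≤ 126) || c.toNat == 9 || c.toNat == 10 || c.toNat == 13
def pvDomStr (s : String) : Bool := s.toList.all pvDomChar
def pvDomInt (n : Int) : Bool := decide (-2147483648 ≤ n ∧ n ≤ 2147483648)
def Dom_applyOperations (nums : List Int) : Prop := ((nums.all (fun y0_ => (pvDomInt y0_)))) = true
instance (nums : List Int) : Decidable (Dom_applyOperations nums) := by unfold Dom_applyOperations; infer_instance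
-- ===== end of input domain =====

-- B fuses A's two in-place passes (adjacent merge, then swap zeros to the end) into one
-- forward scan over disjoint equal pairs that keeps non-zero results and pads with zeros;
-- both Pythons mutate nums in place, the equivalence proved here is about the return value.


-- ===== PORT A =====
-- first loop: for i in range(len(nums)-1): if nums[i]==nums[i+1]: nums[i]*=2; nums[i+1]=0
-- (indices drawn from range(...) are always in range, so getD with default 0 is exact)
def pvStep1 (l : List Int) (i : Nat) : List Int :=
  if l.getD i 0 = l.getD (i+1) 0 then (l.set i (l.getD i 0 * 2)).set (i+1) 0 else l

-- second loop: swap each non-zero element forward to position non_zero_index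
-- (the simultaneous assignment reads both old values before writing, as in Python)
def pvStep2 (s : List Int × Nat) (i : Nat) : List Int × Nat :=
  if s.1.getD i 0 ≠ 0 then
    (((s.1.set s.2 (s.1.getD i 0)).set i (s.1.getD s.2 0)), s.2 + 1)
  else s

def applyOperations (nums : List Int) : List Int :=
  let l1 := (List.range (nums.length - 1)).foldl pvStep1 nums
  ((List.range l1.length).foldl pvStep2 (l1, 0)).1

-- ===== PORT B =====
-- the while loop of Source B: consume a disjoint equal pair (value nums[i]*2) or a single
-- element (value nums[i]), appending to res only when the value is truthy (non-zero)
def pvScan : List Int → List Int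
  | [] => []
  | [x] => if x ≠ 0 then [x] else []
  | x :: y :: t =>
    if x = y then (if x * 2 ≠ 0 then x * 2 :: pvScan t else pvScan t)
    else (if x ≠ 0 then x :: pvScan (y :: t) else pvScan (y :: t))
termination_by l => l.length
decreasing_by all_goals simp

-- nums[:] = res + [0] * (n - len(res)); return nums
def applyOperations_alt (nums : List Int) : List Int :=
  let res := pvScan nums
  res ++ List.replicate (nums.length - res.length) 0

-- ===== PRECONDITION & SPEC =====
def Spec_applyOperations (nums : List Int) (out : List Int) : Prop := out = applyOperations_alt nums
instance (nums : List Int) (out : List Int) : Decidable (Spec_applyOperations nums out) := by unfold Spec_applyOperations; infer_instance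

-- ===== CLAIM (what is proved, stated in full; the proofs are below) =====
def Claim_equal_applyOperations : Prop := ∀ (nums : List Int), Dom_applyOperations nums → Spec_applyOperations nums (applyOperations nums)

-- ===== LEMMAS AND PROOFS =====

-- recursive characterisation of A's first loop on the unprocessed suffix
def pvMerge : List Int → List Int
  | [] => []
  | [x] => [x]
  | x :: y :: t => if x = y then x * 2 :: pvMerge (0 :: t) else x :: pvMerge (y :: t)
termination_by l => l.length
decreasing_by all_goals simp

theorem pvMerge_length : ∀ l : List Int, (pvMerge l).length = l.length := by
  intro l
  fun_induction pvMerge l <;> simp_all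

-- A's first loop equals pvMerge: the fold over range' |p| (|r|-1) acting on p ++ r
theorem loop1_inv : ∀ (r p : List Int),
    (List.range' p.length (r.length - 1)).foldl pvStep1 (p ++ r) = p ++ pvMerge r := by
  intro r
  fun_induction pvMerge r with
  | case1 => intro p; simp [pvMerge]
  | case2 x => intro p; simp [pvMerge]
  | case3 x t ih =>
    intro p
    rw [show ((x : Int) :: x :: t).length - 1 = ((0:Int) :: t).length - 1 + 1 from by simp,
      List.range'_succ, List.foldl_cons]
    have hstep : pvStep1 (p ++ x :: x :: t) p.length = (p ++ [x*2]) ++ (0 :: t) := by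
      simp [pvStep1, List.set_append_right]
    rw [hstep]
    have := ih (p ++ [x*2])
    simp only [List.length_append, List.length_cons, List.length_nil] at this ⊢
    simpa [List.append_assoc, Nat.add_comm] using this
  | case4 x y t hxy ih =>
    intro p
    rw [show ((x : Int) :: y :: t).length - 1 = ((y:Int) :: t).length - 1 + 1 from by simp,
      List.range'_succ, List.foldl_cons]
    have hstep : pvStep1 (p ++ x :: y :: t) p.length = (p ++ [x]) ++ (y :: t) := by
      simp [pvStep1, hxy]
    rw [hstep]
    have := ih (p ++ [x])
    simp only [List.length_append, List.length_cons, List.length_nil] at this ⊢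
    simpa [List.append_assoc, Nat.add_comm] using this

-- A's second loop: stable move of the non-zeros to the front, zeros filling the back
theorem loop2_inv : ∀ (r p : List Int) (j : Nat),
    (List.range' (p.length + j) r.length).foldl pvStep2 (p ++ List.replicate j 0 ++ r, p.length)
    = (p ++ r.filter (· ≠ 0) ++ List.replicate (j + (r.length - (r.filter (· ≠ 0)).length)) 0,
       p.length + (r.filter (· ≠ 0)).length) := by
  intro r
  induction r with
  | nil => intro p j; simp
  | cons x r' ih =>
    intro p j
    rw [show (x::r').length = r'.length + 1 from rfl, List.range'_succ, List.foldl_cons]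
    have hget : (p ++ List.replicate j 0 ++ x :: r').getD (p.length + j) 0 = x := by
      rw [List.append_assoc, List.getD_append_right _ _ _ _ (by omega)]
      rw [List.getD_append_right _ _ _ _ (by simp)]
      simp
    by_cases hx : x = 0
    · subst hx
      have hstep : pvStep2 (p ++ List.replicate j 0 ++ 0 :: r', p.length) (p.length + j)
          = (p ++ List.replicate (j+1) 0 ++ r', p.length) := by
        simp [pvStep2, hget, List.replicate_succ']
      rw [hstep, show p.length + j + 1 = p.length + (j+1) from rfl, ih p (j+1)]
      have hle := List.length_filter_le (fun x => decide (x ≠ 0)) r'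
      have hf : List.filter (fun x => decide (x ≠ 0)) ((0:Int) :: r') = List.filter (fun x => decide (x ≠ 0)) r' := by simp
      rw [hf]
      have hc : j + 1 + (r'.length - (List.filter (fun x => decide (x ≠ 0)) r').length)
          = j + (r'.length + 1 - (List.filter (fun x => decide (x ≠ 0)) r').length) := by omega
      rw [hc]
    · have hstep : pvStep2 (p ++ List.replicate j 0 ++ x :: r', p.length) (p.length + j)
          = ((p ++ [x]) ++ List.replicate j 0 ++ r', p.length + 1) := by
        cases j with
        | zero =>
          simp [pvStep2, hget, hx, List.set_append_right p.length x (le_refl _),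
            List.getD_append_right p _ 0 p.length (le_refl _)]
        | succ jj =>
          have h1 : (p ++ List.replicate (jj+1) 0 ++ x :: r').set p.length x
              = p ++ x :: List.replicate jj 0 ++ x :: r' := by
            rw [List.set_append_left _ _ (by simp)]
            rw [List.set_append_right _ _ (le_refl _)]
            simp [List.replicate_succ]
          have h2 : (p ++ List.replicate (jj+1) 0 ++ x :: r').getD p.length 0 = 0 := by
            rw [List.append_assoc, List.getD_append_right _ _ _ _ (le_refl _)]
            simp [List.replicate_succ]
          have h3 : (p ++ x :: List.replicate jj 0 ++ x :: r').set (p.length + (jj+1)) 0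
              = (p ++ [x]) ++ List.replicate (jj+1) 0 ++ r' := by
            have e : p ++ x :: List.replicate jj 0 ++ x :: r'
                = ((p ++ [x]) ++ List.replicate jj 0) ++ x :: r' := by simp
            rw [e, List.set_append_right _ _ (by
              simp only [List.length_append, List.length_cons, List.length_nil,
                List.length_replicate]; omega)]
            have e2 : p.length + (jj+1) - ((p ++ [x]) ++ List.replicate jj 0).length = 0 := by
              simp only [List.length_append, List.length_cons, List.length_nil,
                List.length_replicate]; omega
            rw [e2]
            simp [List.replicate_succ', List.append_assoc]
          rw [pvStep2]
          simp only [hget, h1, h2, h3, hx, ne_eq, not_false_iff, if_pos]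
      rw [hstep]
      have hih := ih (p ++ [x]) j
      have hl : (p ++ [x]).length = p.length + 1 := by simp
      rw [hl] at hih
      rw [show p.length + j + 1 = p.length + 1 + j from by omega, hih]
      simp [List.filter_cons, hx, List.append_assoc]
      omega

-- a zero chained at the head of the merge recursion contributes nothing non-zero
theorem pvMerge_zero_filter : ∀ t : List Int,
    (pvMerge (0 :: t)).filter (· ≠ 0) = (pvMerge t).filter (· ≠ 0) := by
  intro t
  match t with
  | [] => simp [pvMerge]
  | z :: t' =>
    by_cases hz : (0 : Int) = z
    · subst hz; simp [pvMerge]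
    · rw [show pvMerge (0 :: z :: t') = 0 :: pvMerge (z :: t') from by
        rw [pvMerge]; simp [hz]]
      simp

theorem pvMerge_filter_eq_scan : ∀ l : List Int,
    (pvMerge l).filter (· ≠ 0) = pvScan l := by
  intro l
  induction l using pvScan.induct with
  | case1 => simp [pvMerge, pvScan]
  | case2 x h => simp [pvMerge, pvScan, h]
  | case3 x h => simp [pvMerge, pvScan, h]
  | case4 y t h ih =>
    have hm : pvMerge (y :: y :: t) = y * 2 :: pvMerge (0 :: t) := by rw [pvMerge]; simp
    have hs : pvScan (y :: y :: t) = y * 2 :: pvScan t := by rw [pvScan]; simp [h]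
    rw [hm, hs, List.filter_cons, if_pos (by simpa using h), pvMerge_zero_filter, ih]
  | case5 y t h ih =>
    have hm : pvMerge (y :: y :: t) = y * 2 :: pvMerge (0 :: t) := by rw [pvMerge]; simp
    have hs : pvScan (y :: y :: t) = pvScan t := by rw [pvScan]; simp [h]
    rw [hm, hs, List.filter_cons, if_neg (by simpa using h), pvMerge_zero_filter, ih]
  | case6 x y t hxy h ih =>
    have hm : pvMerge (x :: y :: t) = x :: pvMerge (y :: t) := by rw [pvMerge]; simp [hxy]
    have hs : pvScan (x :: y :: t) = x :: pvScan (y :: t) := by rw [pvScan]; simp [hxy, h]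
    rw [hm, hs, List.filter_cons, if_pos (by simpa using h), ih]
  | case7 x y t hxy h ih =>
    have hm : pvMerge (x :: y :: t) = x :: pvMerge (y :: t) := by rw [pvMerge]; simp [hxy]
    have hs : pvScan (x :: y :: t) = pvScan (y :: t) := by rw [pvScan]; simp [hxy, h]
    rw [hm, hs, List.filter_cons, if_neg (by simpa using h), ih]

-- ===== VERDICT (by name: the statement is the Claim_ definition above) =====
theorem applyOperations_spec : Claim_equal_applyOperations := by
  intro nums _
  unfold Spec_applyOperations applyOperations applyOperations_alt
  have h1 : (List.range (nums.length - 1)).foldl pvStep1 nums = pvMerge nums := by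
    have := loop1_inv nums []
    simpa [List.range_eq_range'] using this
  simp only [h1, pvMerge_length]
  have h2 := loop2_inv (pvMerge nums) [] 0
  simp only [List.nil_append, List.replicate_zero, List.length_nil, Nat.zero_add,
    List.append_nil] at h2
  rw [pvMerge_length] at h2
  rw [List.range_eq_range', h2]
  rw [pvMerge_filter_eq_scan]
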